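-- pv_equiv track=rewrite | github.com/JoeYoung658/A-Level_2016-18 | Hangman/Everyones/Mr Gorman/hangman.py | create_placeholders
-- ===== SOURCE A (Python) =====
-- def find_character(char, word):
--     char_indices = []
--     index = 0
--     for character in word:
--         if character == char:
--             char_indices.append(index)
--         index += 1
--
--     return char_indices
--
-- def create_placeholders(word):
--     placeholders = ["_" for i in range(len(word))]
--     spaces = find_character(" ", word)
--     n_spaces = len(spaces)
--
--     if n_spaces > 0:
--         for index in spaces:
--             placeholders[index] = " "
--
--     return placeholders, n_spaces
-- ===== SOURCE B (Python) =====
-- def create_placeholders(word):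
--     placeholders = [" " if c == " " else "_" for c in word]
--     return placeholders, placeholders.count(" ")
-- ===== Notes on version B (the rewrite author's own statement) =====
-- stated objective: simpler
-- what changed: B drops the find_character index list and the separate marking loop, building the placeholders in one direct comprehension over the characters and counting spaces via list.count.
import Mathlib
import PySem

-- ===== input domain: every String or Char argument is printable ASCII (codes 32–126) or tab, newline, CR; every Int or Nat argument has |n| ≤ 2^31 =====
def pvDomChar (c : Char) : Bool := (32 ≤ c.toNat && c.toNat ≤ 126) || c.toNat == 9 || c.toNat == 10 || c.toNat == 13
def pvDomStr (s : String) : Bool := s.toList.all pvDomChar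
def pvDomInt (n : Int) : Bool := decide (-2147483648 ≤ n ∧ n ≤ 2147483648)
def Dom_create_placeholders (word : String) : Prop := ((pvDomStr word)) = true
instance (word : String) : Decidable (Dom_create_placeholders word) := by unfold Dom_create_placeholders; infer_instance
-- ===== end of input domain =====

-- B builds placeholders in one direct map over the characters (no index list, no second marking loop); objective: simpler.


-- ===== PORT A =====
-- helper of A: collect the indices at which `char` occurs (loop with a running index)
def find_character (char : Char) (word : String) : List Int :=
  (word.toList.foldl
    (fun (st : List Int × Int) character =>
      (if character == char then st.1 ++ [st.2] else st.1, st.2 + 1))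
    ([], 0)).1

def create_placeholders (word : String) : List String × Int :=
  let placeholders := (PySem.List.pyRange 0 (PySem.Str.len word) 1).map (fun _ => "_")
  let spaces := find_character ' ' word
  let n_spaces : Int := spaces.length
  let placeholders :=
    if n_spaces > 0 then
      spaces.foldl (fun p index => PySem.List.pySetD p index " ") placeholders
    else placeholders
  (placeholders, n_spaces)

-- ===== PORT B =====
def create_placeholders_alt (word : String) : List String × Int :=
  let placeholders := word.toList.map (fun c => if c == ' ' then " " else "_")
  (placeholders, (PySem.List.count placeholders " " : Int))

-- ===== PRECONDITION & SPEC =====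
def Spec_create_placeholders (word : String) (out : List String × Int) : Prop := out = create_placeholders_alt word
instance (word : String) (out : List String × Int) : Decidable (Spec_create_placeholders word out) := by unfold Spec_create_placeholders; infer_instance

-- ===== CLAIM (what is proved, stated in full; the proofs are below) =====
def Claim_equal_create_placeholders : Prop := ∀ (word : String), Dom_create_placeholders word → Spec_create_placeholders word (create_placeholders word)

-- ===== LEMMAS AND PROOFS =====

-- the list of (Int) indices of ' ' in cs, counting from k
def spaceIdxs : List Char → Int → List Int
  | [], _ => []
  | c :: cs, k => (if c == ' ' then [k] else []) ++ spaceIdxs cs (k + 1)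

theorem find_character_eq_spaceIdxs (cs : List Char) :
    ∀ (acc : List Int) (k : Int),
      cs.foldl
        (fun (st : List Int × Int) character =>
          (if character == ' ' then st.1 ++ [st.2] else st.1, st.2 + 1))
        (acc, k) = (acc ++ spaceIdxs cs k, k + cs.length) := by
  induction cs with
  | nil => intro acc k; simp [spaceIdxs]
  | cons c cs ih =>
    intro acc k
    simp only [List.foldl_cons, spaceIdxs]
    by_cases h : c = ' '
    · rw [if_pos (by simp [h]), ih]
      simp [h, List.append_assoc, List.length_cons]
      ring
    · rw [if_neg (by simp [h]), ih]
      simp [h, List.length_cons]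
      ring

theorem length_spaceIdxs (cs : List Char) :
    ∀ k, (spaceIdxs cs k).length = cs.countP (· == ' ') := by
  induction cs with
  | nil => intro k; simp [spaceIdxs]
  | cons c cs ih =>
    intro k
    by_cases h : c = ' ' <;> simp [spaceIdxs, h, ih]

theorem foldl_set_spaceIdxs (cs : List Char) :
    ∀ (q : List String),
      (spaceIdxs cs (q.length : Int)).foldl (fun p index => PySem.List.pySetD p index " ")
          (q ++ List.replicate cs.length "_")
        = q ++ cs.map (fun c => if c == ' ' then " " else "_") := by
  induction cs with
  | nil => intro q; simp [spaceIdxs]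
  | cons c cs ih =>
    intro q
    by_cases h : c = ' '
    · have h2 := ih (q ++ [" "])
      simp only [List.length_append, List.length_cons] at h2 ⊢
      simp [spaceIdxs, h]
      simpa [Nat.cast_add, List.append_assoc] using h2
    · have h2 := ih (q ++ ["_"])
      simp only [List.length_append] at h2
      simp [spaceIdxs, h]
      simpa [Nat.cast_add, List.append_assoc] using h2

theorem count_map_mark (cs : List Char) :
    (cs.map (fun c => if c == ' ' then " " else "_")).count " " = cs.countP (· == ' ') := by
  induction cs with
  | nil => rfl
  | cons c cs ih =>
    simp only [List.map_cons, List.count_cons, List.countP_cons, ih]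
    by_cases h : c = ' ' <;> simp [h]

theorem map_mark_eq_replicate (cs : List Char) (h : cs.countP (· == ' ') = 0) :
    cs.map (fun c => if c == ' ' then " " else "_") = List.replicate cs.length "_" := by
  induction cs with
  | nil => rfl
  | cons c cs ih =>
    rw [List.countP_cons] at h
    by_cases hc : c = ' '
    · simp [hc] at h
    · have h' : cs.countP (· == ' ') = 0 := by omega
      rw [List.map_cons, if_neg (by simp [hc]), ih h', List.length_cons, List.replicate_succ]

-- ===== VERDICT (by name: the statement is the Claim_ definition above) =====
theorem create_placeholders_spec : Claim_equal_create_placeholders := by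
  intro word _
  unfold Spec_create_placeholders create_placeholders create_placeholders_alt find_character
  set cs := word.toList with hcs
  have hlen : PySem.Str.len word = (cs.length : Int) := by
    simp [PySem.Str.len_eq, hcs]
  have hinit : (PySem.List.pyRange 0 (PySem.Str.len word) 1).map (fun _ => "_")
      = List.replicate cs.length "_" := by
    rw [hlen, PySem.List.pyRange_zero_natCast, List.map_map]
    simp only [Function.comp_def]
    rw [List.map_const', List.length_range]
  have hfind := find_character_eq_spaceIdxs cs [] 0
  have hset := foldl_set_spaceIdxs cs []
  simp only [List.nil_append, List.length_nil, Nat.cast_zero] at hfind hset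
  have hcount : PySem.List.count (cs.map (fun c => if c == ' ' then " " else "_")) " "
      = (spaceIdxs cs 0).length := by
    rw [PySem.List.count_eq, count_map_mark, length_spaceIdxs]
  simp only [hinit, hfind]
  by_cases hne : spaceIdxs cs 0 = []
  · have hc : cs.countP (· == ' ') = 0 := by
      have := length_spaceIdxs cs 0
      rw [hne] at this
      simpa using this.symm
    rw [hne]
    simp only [List.length_nil, Nat.cast_zero, Prod.mk.injEq]
    rw [if_neg (by norm_num : ¬ ((0:Int) > 0))]
    refine ⟨(map_mark_eq_replicate cs hc).symm, ?_⟩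
    rw [hcount, hne]
    simp
  · have hpos : ((spaceIdxs cs 0).length : Int) > 0 := by
      have := List.length_pos_of_ne_nil hne
      exact_mod_cast this
    rw [if_pos hpos]
    simp only [Prod.mk.injEq]
    exact ⟨hset, by rw [hcount]⟩
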